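-- pv_equiv track=rewrite | github.com/chexo7/StormwaterAPP | scripts/update_soil_hsg_map.py | clean_hsg_token
-- ===== SOURCE A (Python) =====
-- def clean_hsg_token(raw: str | None) -> str:
--     if raw is None:
--         return ""
--     text = str(raw).strip().upper()
--     for letter in ("A", "B", "C", "D"):
--         if letter in text:
--             return letter
--     return ""
-- ===== SOURCE B (Python) =====
-- def clean_hsg_token(raw):
--     if raw is None:
--         return ""
--     present = set(str(raw).strip().upper()) & {"A", "B", "C", "D"}
--     return min(present) if present else ""
-- ===== Notes on version B (the rewrite author's own statement) =====
-- stated objective: simpler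
-- what changed: Replaces the explicit priority loop with early return by intersecting the character set of the cleaned text with the set of the four HSG letters and reducing it with min, which yields the same alphabetically-first winner.
import Mathlib
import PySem

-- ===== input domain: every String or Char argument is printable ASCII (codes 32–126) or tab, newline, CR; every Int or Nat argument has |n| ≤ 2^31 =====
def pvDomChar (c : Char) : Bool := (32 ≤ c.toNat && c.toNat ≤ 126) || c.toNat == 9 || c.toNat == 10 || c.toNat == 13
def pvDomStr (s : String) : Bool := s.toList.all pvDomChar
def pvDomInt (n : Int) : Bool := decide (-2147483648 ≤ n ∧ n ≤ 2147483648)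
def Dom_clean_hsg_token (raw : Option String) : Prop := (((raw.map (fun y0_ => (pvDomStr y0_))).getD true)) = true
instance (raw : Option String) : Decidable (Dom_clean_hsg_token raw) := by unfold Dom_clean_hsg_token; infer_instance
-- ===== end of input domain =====

-- B replaces A's priority loop by intersecting the set of characters with {'A','B','C','D'} and taking min (objective: simpler).

-- ===== PORT A =====
-- the 'for letter in ("A","B","C","D")' loop with early return
def pvHsgLoop (text : String) : List String → String
  | [] => ""
  | l :: rest => if PySem.Str.isIn l text then l else pvHsgLoop text rest

def clean_hsg_token (raw : Option String) : String :=
  match raw with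
  | none => ""
  | some s =>
    let text := PySem.Str.upper (PySem.Str.strip s)
    pvHsgLoop text ["A", "B", "C", "D"]

-- ===== PORT B =====
def clean_hsg_token_alt (raw : Option String) : String :=
  match raw with
  | none => ""
  | some s =>
    let present : PySem.Set Char :=
      PySem.Set.inter (PySem.Set.ofList (PySem.Str.upper (PySem.Str.strip s)).toList)
        (['A', 'B', 'C', 'D'] : List Char)
    match PySem.List.min? present (fun x => x) with
    | some c => String.ofList [c]
    | none => ""

-- ===== PRECONDITION & SPEC =====
def Spec_clean_hsg_token (raw : Option String) (out : String) : Prop := out = clean_hsg_token_alt raw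
instance (raw : Option String) (out : String) : Decidable (Spec_clean_hsg_token raw out) := by unfold Spec_clean_hsg_token; infer_instance

-- ===== CLAIM (what is proved, stated in full; the proofs are below) =====
def Claim_equal_clean_hsg_token : Prop := ∀ (raw : Option String), Dom_clean_hsg_token raw → Spec_clean_hsg_token raw (clean_hsg_token raw)

-- ===== LEMMAS AND PROOFS =====

theorem pv_mem_inter_ABCD (cs : List Char) (x : Char) :
    x ∈ PySem.Set.inter (PySem.Set.ofList cs) (['A', 'B', 'C', 'D'] : List Char) ↔
      x ∈ cs ∧ x ∈ (['A', 'B', 'C', 'D'] : List Char) := by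
  simp [pysem]

theorem pv_min_inter_some (cs : List Char) (c : Char)
    (hc : c ∈ cs) (hcL : c ∈ (['A', 'B', 'C', 'D'] : List Char))
    (hmin : ∀ x : Char, x ∈ (['A', 'B', 'C', 'D'] : List Char) → x ∈ cs → c ≤ x) :
    PySem.List.min? (PySem.Set.inter (PySem.Set.ofList cs) (['A', 'B', 'C', 'D'] : List Char))
      (fun x => x) = some c := by
  cases hmn : PySem.List.min?
      (PySem.Set.inter (PySem.Set.ofList cs) (['A', 'B', 'C', 'D'] : List Char)) (fun x => x) with
  | none =>
    exfalso
    rw [PySem.List.min?_eq_none_iff] at hmn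
    have hcmem := (pv_mem_inter_ABCD cs c).mpr ⟨hc, hcL⟩
    rw [hmn] at hcmem
    simp at hcmem
  | some m =>
    have h1 : m ≤ c := by
      simpa using PySem.List.min?_isMin hmn c ((pv_mem_inter_ABCD cs c).mpr ⟨hc, hcL⟩)
    obtain ⟨hm_cs, hm_L⟩ := (pv_mem_inter_ABCD cs m).mp (PySem.List.min?_mem hmn)
    have h2 : c ≤ m := hmin m hm_L hm_cs
    rw [le_antisymm h1 h2]

theorem pv_min_inter_none (cs : List Char)
    (h : ∀ x : Char, x ∈ (['A', 'B', 'C', 'D'] : List Char) → x ∉ cs) :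
    PySem.List.min? (PySem.Set.inter (PySem.Set.ofList cs) (['A', 'B', 'C', 'D'] : List Char))
      (fun x => x) = none := by
  rw [PySem.List.min?_eq_none_iff, List.eq_nil_iff_forall_not_mem]
  intro x hx
  obtain ⟨h1, h2⟩ := (pv_mem_inter_ABCD cs x).mp hx
  exact h x h2 h1

theorem pv_hsg_core (t : String) :
    pvHsgLoop t ["A", "B", "C", "D"] =
      (match PySem.List.min?
          (PySem.Set.inter (PySem.Set.ofList t.toList) (['A', 'B', 'C', 'D'] : List Char))
          (fun x => x) with
        | some c => String.ofList [c]
        | none => "") := by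
  have hp : ∀ c : Char, PySem.Chars.isIn [c] t.toList = true ↔ c ∈ t.toList := by
    intro c
    rw [PySem.Chars.isIn_iff_infix]
    exact List.singleton_infix_iff c t.toList
  by_cases hA : 'A' ∈ t.toList
  · rw [pv_min_inter_some t.toList 'A' hA (by decide)
      (by intro x hx _; fin_cases hx <;> decide)]
    simp [pvHsgLoop, hp, hA]
  · by_cases hB : 'B' ∈ t.toList
    · rw [pv_min_inter_some t.toList 'B' hB (by decide)
        (by intro x hx hxc; fin_cases hx
            · exact absurd hxc hA
            all_goals decide)]
      simp [pvHsgLoop, hp, hA, hB]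
    · by_cases hC : 'C' ∈ t.toList
      · rw [pv_min_inter_some t.toList 'C' hC (by decide)
          (by intro x hx hxc; fin_cases hx
              · exact absurd hxc hA
              · exact absurd hxc hB
              all_goals decide)]
        simp [pvHsgLoop, hp, hA, hB, hC]
      · by_cases hD : 'D' ∈ t.toList
        · rw [pv_min_inter_some t.toList 'D' hD (by decide)
            (by intro x hx hxc; fin_cases hx
                · exact absurd hxc hA
                · exact absurd hxc hB
                · exact absurd hxc hC
                · decide)]
          simp [pvHsgLoop, hp, hA, hB, hC, hD]
        · rw [pv_min_inter_none t.toList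
            (by intro x hx; fin_cases hx <;> assumption)]
          simp [pvHsgLoop, hp, hA, hB, hC, hD]

-- ===== VERDICT (by name: the statement is the Claim_ definition above) =====
theorem clean_hsg_token_spec : Claim_equal_clean_hsg_token := by
  intro raw _
  unfold Spec_clean_hsg_token clean_hsg_token clean_hsg_token_alt
  cases raw with
  | none => rfl
  | some s => exact pv_hsg_core (PySem.Str.upper (PySem.Str.strip s))
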